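-- pv_equiv track=rewrite | github.com/stojneva/Python-Fundamentals | functions/palindrome_integers.py | positive_integers
-- ===== SOURCE A (Python) =====
-- def positive_integers(numbers):
--     result = []
--     for num in numbers:
--         if num == num[::-1]:
--             result.append("True")
--         else:
--             result.append("False")
--     return "\n".join(result)
-- ===== SOURCE B (Python) =====
-- def positive_integers(numbers):
--     result = []
--     for num in numbers:
--         i = 0
--         j = len(num) - 1
--         pal = True
--         while i < j:
--             if num[i] != num[j]:
--                 pal = False
--                 break
--             i += 1
--             j -= 1
--         result.append("True" if pal else "False")
--     return "\n".join(result)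
-- ===== Notes on version B (the rewrite author's own statement) =====
-- stated objective: alternative
-- what changed: The per-string palindrome test builds no reversed copy: instead of comparing num to num[::-1], B walks two pointers inward and stops at the first mismatch, scanning at most half the string.
import Mathlib
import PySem

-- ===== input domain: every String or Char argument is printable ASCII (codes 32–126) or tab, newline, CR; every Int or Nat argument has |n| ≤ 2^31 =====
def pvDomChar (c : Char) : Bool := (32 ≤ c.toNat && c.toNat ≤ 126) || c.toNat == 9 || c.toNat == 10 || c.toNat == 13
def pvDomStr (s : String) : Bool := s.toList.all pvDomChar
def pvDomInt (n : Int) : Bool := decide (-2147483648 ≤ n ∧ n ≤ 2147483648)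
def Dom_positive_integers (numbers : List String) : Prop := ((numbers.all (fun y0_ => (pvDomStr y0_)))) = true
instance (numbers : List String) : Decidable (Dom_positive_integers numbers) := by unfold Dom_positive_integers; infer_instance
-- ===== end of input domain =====

-- B replaces A's build-reverse-then-compare palindrome test (num == num[::-1]) by an
-- in-place two-pointer inward scan with early exit; the outer append-and-join scaffold is kept.

-- ===== PORT A =====
-- num == num[::-1]  (slice? with step -1 never raises; the none branch is unreachable)
def pvRevEq (num : String) : Bool :=
  match PySem.Str.slice? num none none (-1) with
  | some r => num == r
  | none => false

def positive_integers (numbers : List String) : String :=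
  let result : List String :=
    numbers.foldl (fun acc num => acc ++ [if pvRevEq num then "True" else "False"]) []
  PySem.Str.join "\n" result

-- ===== PORT B =====
-- the while loop: i, j walk inward; 0 ≤ i < j < len throughout, so pyGetD is exact (num[i], num[j] never raise)
def pvPalLoop (cs : List Char) (i j : Int) : Bool :=
  if _h : i < j then
    if PySem.List.pyGetD cs i ' ' ≠ PySem.List.pyGetD cs j ' ' then false
    else pvPalLoop cs (i + 1) (j - 1)
  else true
termination_by (j - i).toNat
decreasing_by omega

def positive_integers_alt (numbers : List String) : String :=
  let result : List String :=
    numbers.foldl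
      (fun acc num =>
        acc ++ [if pvPalLoop num.toList 0 (PySem.Str.len num - 1) then "True" else "False"]) []
  PySem.Str.join "\n" result

-- ===== PRECONDITION & SPEC =====
def Spec_positive_integers (numbers : List String) (out : String) : Prop := out = positive_integers_alt numbers
instance (numbers : List String) (out : String) : Decidable (Spec_positive_integers numbers out) := by unfold Spec_positive_integers; infer_instance

-- ===== CLAIM (what is proved, stated in full; the proofs are below) =====
def Claim_equal_positive_integers : Prop := ∀ (numbers : List String), Dom_positive_integers numbers → Spec_positive_integers numbers (positive_integers numbers)

-- ===== LEMMAS AND PROOFS =====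

-- the two-pointer loop returns true iff the segment [i, j] is mirror-symmetric about i + j
theorem pvPalLoop_true_iff (cs : List Char) (i j : Int) :
    pvPalLoop cs i j = true ↔
      ∀ k : Int, i ≤ k → k ≤ j →
        PySem.List.pyGetD cs k ' ' = PySem.List.pyGetD cs (i + j - k) ' ' := by
  induction i, j using pvPalLoop.induct cs with
  | case1 i j hij hne =>
    rw [pvPalLoop]
    simp only [hij, dite_true, if_pos hne]
    constructor
    · intro h; exact absurd h (by simp)
    · intro h
      have hi := h i le_rfl (le_of_lt hij)
      have he : i + j - i = j := by omega
      rw [he] at hi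
      exact absurd hi hne
  | case2 i j hij hne ih =>
    rw [pvPalLoop]
    simp only [hij, dite_true, if_neg hne]
    rw [not_ne_iff] at hne
    constructor
    · intro h k hk1 hk2
      rcases eq_or_lt_of_le hk1 with heq | hk1'
      · rw [← heq, show i + j - i = j from by omega]; exact hne
      rcases eq_or_lt_of_le hk2 with heq | hk2'
      · rw [heq, show i + j - j = i from by omega]; exact hne.symm
      have hm := (ih.mp h) k (by omega) (by omega)
      have hc : i + 1 + (j - 1) - k = i + j - k := by omega
      rw [hc] at hm; exact hm
    · intro h
      refine ih.mpr ?_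
      intro k hk1 hk2
      have hm := h k (by omega) (by omega)
      have hc : i + 1 + (j - 1) - k = i + j - k := by omega
      rw [hc]; exact hm
  | case3 i j hij =>
    rw [pvPalLoop]
    simp only [hij, dite_false]
    constructor
    · intro _ k hk1 hk2
      have he : i + j - k = k := by omega
      rw [he]
    · intro _; trivial

-- mirror symmetry of the whole list is exactly cs = cs.reverse
theorem pal_iff_reverse (cs : List Char) :
    (∀ k : Int, 0 ≤ k → k ≤ (cs.length : Int) - 1 →
        PySem.List.pyGetD cs k ' ' = PySem.List.pyGetD cs (0 + ((cs.length : Int) - 1) - k) ' ')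
      ↔ cs = cs.reverse := by
  constructor
  · intro h
    apply List.ext_getElem (by simp)
    intro n hn hn'
    have hk := h (n : Int) (by omega) (by omega)
    rw [PySem.List.pyGetD_eq_getElem cs ' ' (by omega) (by omega),
        PySem.List.pyGetD_eq_getElem cs ' ' (by omega) (by omega)] at hk
    rw [List.getElem_reverse]
    have he : (0 + ((cs.length : Int) - 1) - (n : Int)).toNat = cs.length - 1 - n := by omega
    simp only [he, Int.toNat_natCast] at hk
    exact hk
  · intro h k hk1 hk2
    have he : (0 + ((cs.length : Int) - 1) - k).toNat = cs.length - 1 - k.toNat := by omega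
    rw [PySem.List.pyGetD_eq_getElem cs ' ' hk1 (by omega),
        PySem.List.pyGetD_eq_getElem cs ' ' (by omega) (by omega)]
    simp only [he]
    rw [← List.getElem_reverse (l := cs) (i := k.toNat) (by simp; omega)]
    exact List.getElem_of_eq h _

-- per-string agreement of the two palindrome tests
theorem pvRevEq_eq_pvPalLoop (num : String) :
    pvRevEq num = pvPalLoop num.toList 0 (PySem.Str.len num - 1) := by
  rw [pvRevEq, PySem.Str.slice?_none_none_neg_one]
  have hbeq : (num == String.ofList num.toList.reverse) = decide (num.toList = num.toList.reverse) := by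
    by_cases h : num.toList = num.toList.reverse
    · have he : num = String.ofList num.toList.reverse := String.toList_inj.mp (by simpa using h)
      rw [← he]; simp only [beq_self_eq_true]; exact (decide_eq_true h).symm
    · have h2 : num ≠ String.ofList num.toList.reverse := fun he => h (by simpa using congrArg String.toList he)
      simp [h, h2]
  simp only [hbeq]
  have hlen : PySem.Str.len num = (num.toList.length : Int) := by simp [PySem.Str.len_eq]
  have hiff := pvPalLoop_true_iff num.toList 0 (PySem.Str.len num - 1)
  rcases Bool.eq_false_or_eq_true (pvPalLoop num.toList 0 (PySem.Str.len num - 1)) with hb | hb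
  · rw [hb]
    apply decide_eq_true
    rw [hb] at hiff
    have hall := hiff.mp rfl
    rw [hlen] at hall
    exact (pal_iff_reverse num.toList).mp hall
  · rw [hb]
    apply decide_eq_false
    intro hrev
    have hall := (pal_iff_reverse num.toList).mpr hrev
    rw [hb] at hiff
    simpa using hiff.mpr (by rw [hlen]; intro k h1 h2; exact hall k h1 h2)

-- ===== VERDICT (by name: the statement is the Claim_ definition above) =====
theorem positive_integers_spec : Claim_equal_positive_integers := by
  intro numbers _
  unfold Spec_positive_integers positive_integers positive_integers_alt
  simp only [PySem.List.foldl_append_singleton_eq_map, List.nil_append]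
  congr 1
  apply List.map_congr_left
  intro num _
  rw [pvRevEq_eq_pvPalLoop]
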